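-- pv_equiv track=rewrite | github.com/dhruvbaid/AdventOfCode2021 | Day 18/Day 18.py | split
-- ===== SOURCE A (Python) =====
-- from math import floor, ceil
--
-- def split(s: str):
--     i = 0
--     while i < len(s):
--         if s[i] not in ["[", "]", ","]:
--             sIndex = i
--             while i < len(s) and s[i] not in ["[", "]", ","]:
--                 i += 1
--             eIndex = i
--             num = int(s[sIndex: eIndex])
--             if num >= 10:
--                 nMin = int(floor(num/2))
--                 nMax = int(ceil(num/2))
--                 if eIndex < len(s):
--                     return s[:sIndex] + f"[{nMin},{nMax}]" + s[eIndex:]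
--                 else:
--                     return s[:sIndex] + f"[{nMin},{nMax}]"
--         i += 1
--     return s
-- ===== SOURCE B (Python) =====
-- import re
-- from math import floor, ceil
--
-- def split(s: str):
--     # tokenize once: re.split with a capturing group keeps the delimiters as
--     # their own pieces; drop the empty pieces between adjacent delimiters
--     pieces = [p for p in re.split(r'([\[\],])', s) if p != '']
--     out = []
--     it = iter(pieces)
--     for p in it:
--         if p in ('[', ']', ','):
--             out.append(p)
--         else:
--             num = int(p)
--             if num >= 10:
--                 out.append(f"[{int(floor(num/2))},{int(ceil(num/2))}]")
--                 out.extend(it)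
--                 return ''.join(out)
--             out.append(p)
--     return s
-- ===== Notes on version B (the rewrite author's own statement) =====
-- stated objective: alternative
-- what changed: B replaces A's character-index state machine (an outer while over positions with an inner scanning while, index bookkeeping and string slicing) by a staged tokenize-then-join pass: it splits the string once into delimiter/token pieces with re.split(r'([\[\],])', s) and rebuilds the output as a join of those pieces, substituting the first token whose int value is >= 10.
import Mathlib
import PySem

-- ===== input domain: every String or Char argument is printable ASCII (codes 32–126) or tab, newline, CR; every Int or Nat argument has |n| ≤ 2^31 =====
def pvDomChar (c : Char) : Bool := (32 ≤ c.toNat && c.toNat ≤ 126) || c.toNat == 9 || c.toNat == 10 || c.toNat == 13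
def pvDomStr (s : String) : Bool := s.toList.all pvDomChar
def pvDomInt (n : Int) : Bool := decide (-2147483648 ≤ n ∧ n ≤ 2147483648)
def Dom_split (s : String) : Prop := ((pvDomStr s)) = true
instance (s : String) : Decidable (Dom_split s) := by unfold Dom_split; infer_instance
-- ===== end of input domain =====

-- B replaces A's character-index state machine (nested whiles, integer slicing) by a staged
-- tokenize-once-then-join pass: split the string into delimiter/token pieces up front and
-- rebuild the output as a join of pieces, replacing the first token >= 10 (objective: alternative).


-- ===== PORT A =====
-- s[i] in ["[", "]", ","]
def pvDelim (c : Char) : Bool := c == '[' || c == ']' || c == ','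

-- int(floor(num/2)) / int(ceil(num/2)) where num/2 is Python FLOAT division: ported by hand,
-- exact for 0 ≤ num < 2^1025 - 2^971 (A raises OverflowError at and beyond that bound, excluded
-- by Pre_): below 2^53 the quotient is an exact float; above, num/2 rounds half-to-even to a
-- 53-bit significand and floor = ceil = that (integral) value.
def pvFlHalf (n : Int) : Int :=
  let m := n.toNat
  let s := PySem.Int.bitLength n - 53
  let q := m >>> s
  let r := m % 2 ^ s
  let half := 2 ^ (s - 1)
  let q' := if half < r ∨ (r = half ∧ q % 2 = 1) then q + 1 else q
  ((q' * 2 ^ (s - 1) : Nat) : Int)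

def pvHalfFloor (n : Int) : Int :=
  if n < 2 ^ 53 then PySem.Int.floordiv n 2 else pvFlHalf n

def pvHalfCeil (n : Int) : Int :=
  if n < 2 ^ 53 then PySem.Int.floordiv (n + 1) 2 else pvFlHalf n

-- inner `while i < len(s) and s[i] not in ["[", "]", ","]: i += 1`, returning the final i
def pvScan (cs : List Char) (i : Nat) : Nat :=
  if h : i < cs.length then
    if pvDelim cs[i] then i else pvScan cs (i + 1)
  else i
termination_by cs.length - i
decreasing_by exact Nat.sub_succ_lt_self cs.length i h

-- needed by pvLoop's termination: the inner while never moves i backwards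
lemma pvScan_ge (cs : List Char) (i : Nat) : i ≤ pvScan cs i := by
  fun_induction pvScan cs i <;> omega

-- outer while loop of A; int() is PySem.Int.ofChars? (getD 0 unreachable under Pre_)
def pvLoop (cs : List Char) (i : Nat) : List Char :=
  if h : i < cs.length then
    if !pvDelim cs[i] then
      let e := pvScan cs i
      let num := (PySem.Int.ofChars? (PySem.List.slice cs (some (i : Int)) (some (e : Int)))).getD 0
      if 10 ≤ num then
        let nMin := pvHalfFloor num
        let nMax := pvHalfCeil num
        if e < cs.length then
          PySem.List.slice cs none (some (i : Int)) ++
            ('[' :: PySem.Int.toChars nMin ++ ',' :: PySem.Int.toChars nMax ++ [']']) ++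
            PySem.List.slice cs (some (e : Int)) none
        else
          PySem.List.slice cs none (some (i : Int)) ++
            ('[' :: PySem.Int.toChars nMin ++ ',' :: PySem.Int.toChars nMax ++ [']'])
      else pvLoop cs (e + 1)
    else pvLoop cs (i + 1)
  else cs
termination_by cs.length - i
decreasing_by
  · exact Nat.sub_lt_sub_left h (Nat.lt_succ_of_le (pvScan_ge cs i))
  · exact Nat.sub_lt_sub_left h (Nat.lt_succ_self i)

def split (s : String) : String := String.ofList (pvLoop s.toList 0)

-- ===== PORT B =====
-- the token-character class (anything but '[' ']' ',')
def pvTokChar (c : Char) : Bool := !(c == '[' || c == ']' || c == ',')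

-- re.split(r'([\[\],])', s): alternating token/delimiter pieces (tokens possibly empty),
-- built char by char: a token char is consed onto the current first piece, a delimiter char
-- opens its own singleton piece
def pvSplitCap : List Char → List (List Char)
  | [] => [[]]
  | c :: cs =>
      if pvTokChar c then
        match pvSplitCap cs with
        | t :: ps => (c :: t) :: ps
        | [] => [[c]]
      else [] :: [c] :: pvSplitCap cs

-- the for-loop over pieces with the `out` accumulator; `some r` = the returned join, `none` = fall through
def pvBLoop (rest : List (List Char)) (out : List (List Char)) : Option (List Char) :=
  match rest with
  | [] => none
  | p :: ps =>
      if p = ['['] ∨ p = [']'] ∨ p = [','] then pvBLoop ps (out ++ [p])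
      else
        let num := (PySem.Int.ofChars? p).getD 0
        if 10 ≤ num then
          some ((out ++ [('[' :: PySem.Int.toChars (pvHalfFloor num) ++
            ',' :: PySem.Int.toChars (pvHalfCeil num) ++ [']'])] ++ ps).flatten)
        else pvBLoop ps (out ++ [p])

def split_alt (s : String) : String :=
  match pvBLoop ((pvSplitCap s.toList).filter (fun p => !p.isEmpty)) [] with
  | some r => String.ofList r
  | none => s

-- ===== PRECONDITION & SPEC =====
-- Pre_ excludes exactly the inputs on which A raises: a token that int() rejects occurring
-- before (or as) the first token of value >= 10 (ValueError), and a first big token of value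
-- at least 2^1025 - 2^971 (pvOverflowBound), where Python's float division num/2 raises OverflowError.
-- 2^1025 - 2^971, written as a literal so that `decide` need not unfold a 1025-fold power
def pvOverflowBound : Int := 359538626972463161587457942810606830159868265420075653872347557960889936585529501893298035955174414192660572833385775821893111095703880805261314977343011641363817804001416767352547709691635423063528951460540139711142733919245685829639721669872950585438148336888731021408685423119399016186085760355808348995584

def pvTokOK : List (List Char) → Bool
  | [] => true
  | t :: ts =>
      match PySem.Int.ofChars? t with
      | none => false
      | some n => if 10 ≤ n then decide (n < pvOverflowBound) else pvTokOK ts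

def Pre_split (s : String) : Prop :=
  pvTokOK ((s.toList.splitOnP (fun c => c == '[' || c == ']' || c == ',')).filter
    (fun t => !t.isEmpty)) = true

instance (s : String) : Decidable (Pre_split s) := by unfold Pre_split; infer_instance

def pvWitness_split : String := "[10,1]"

def Spec_split (s : String) (out : String) : Prop := out = split_alt s
instance (s : String) (out : String) : Decidable (Spec_split s out) := by
  unfold Spec_split; infer_instance

-- ===== CLAIM (what is proved, stated in full; the proofs are below) =====
def Claim_equal_split : Prop := ∀ (s : String), Dom_split s → Pre_split s → Spec_split s (split s)

-- ===== LEMMAS AND PROOFS =====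

lemma pvTokChar_eq (c : Char) : pvTokChar c = !pvDelim c := rfl

lemma pvDelim_iff (c : Char) : pvDelim c = true ↔ (c = '[' ∨ c = ']' ∨ c = ',') := by
  simp [pvDelim, or_assoc]

lemma drop_takeWhile (p : Char → Bool) (l : List Char) :
    l.drop (l.takeWhile p).length = l.dropWhile p := by
  calc l.drop (l.takeWhile p).length
      = (l.takeWhile p ++ l.dropWhile p).drop (l.takeWhile p).length := by
        rw [List.takeWhile_append_dropWhile]
    _ = l.dropWhile p := List.drop_left

lemma take_takeWhile (p : Char → Bool) (l : List Char) :
    l.take (l.takeWhile p).length = l.takeWhile p := by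
  calc l.take (l.takeWhile p).length
      = (l.takeWhile p ++ l.dropWhile p).take (l.takeWhile p).length := by
        rw [List.takeWhile_append_dropWhile]
    _ = l.takeWhile p := List.take_left

lemma pvScan_spec (cs : List Char) (i : Nat) :
    pvScan cs i = i + ((cs.drop i).takeWhile pvTokChar).length := by
  fun_induction pvScan cs i with
  | case1 i h hd =>
      rw [List.drop_eq_getElem_cons h, List.takeWhile_cons]
      simp [pvTokChar_eq, hd]
  | case2 i h hd ih =>
      have hd' : pvDelim cs[i] = false := by simpa using hd
      rw [List.drop_eq_getElem_cons h, List.takeWhile_cons]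
      simp only [pvTokChar_eq, hd', Bool.not_false, if_pos, List.length_cons, ih]
      omega
  | case3 i h =>
      rw [List.drop_eq_nil_of_le (Nat.le_of_not_lt h)]
      simp

lemma pvScan_le (cs : List Char) (i : Nat) (h : i ≤ cs.length) : pvScan cs i ≤ cs.length := by
  have := pvScan_spec cs i
  have h2 : ((cs.drop i).takeWhile pvTokChar).length ≤ (cs.drop i).length :=
    (List.takeWhile_prefix pvTokChar).length_le
  simp only [List.length_drop] at h2
  omega

lemma pvScan_stop (cs : List Char) (i : Nat) (h : pvScan cs i < cs.length) :
    pvDelim cs[pvScan cs i] = true := by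
  fun_induction pvScan cs i with
  | case1 i h' hd => exact hd
  | case2 i h' hd ih => exact ih h
  | case3 i h' => omega

-- the token piece at i is exactly A's slice s[i:pvScan i]
lemma tok_slice (cs : List Char) (i : Nat) :
    (cs.drop i).takeWhile pvTokChar =
      PySem.List.slice cs (some (i : Int)) (some ((pvScan cs i : Nat) : Int)) := by
  rw [PySem.List.slice_natCast, pvScan_spec cs i, Nat.add_sub_cancel_left,
    take_takeWhile]

-- pvSplitCap never produces the empty list of pieces
lemma splitCap_ne_nil (l : List Char) : pvSplitCap l ≠ [] := by
  cases l with
  | nil => simp [pvSplitCap]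
  | cons c cs =>
      rw [pvSplitCap]
      split
      · cases h : pvSplitCap cs <;> simp
      · simp

-- unfolding pvSplitCap along the leading token run
lemma splitCap_run (l : List Char) :
    pvSplitCap l =
      (match l.dropWhile pvTokChar with
        | [] => [l.takeWhile pvTokChar]
        | d :: rs => l.takeWhile pvTokChar :: [d] :: pvSplitCap rs) := by
  induction l with
  | nil => rfl
  | cons c cs ih =>
      by_cases hc : pvTokChar c
      · rw [pvSplitCap, if_pos hc, List.dropWhile_cons, List.takeWhile_cons, if_pos hc, hc]
        simp only [if_true, ih]
        cases h : cs.dropWhile pvTokChar <;> simp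
      · have hc' : pvTokChar c = false := by simpa using hc
        rw [pvSplitCap, if_neg hc, List.dropWhile_cons, List.takeWhile_cons, hc']
        simp

lemma splitCap_of_dropWhile_nil (l : List Char) (h : l.dropWhile pvTokChar = []) :
    pvSplitCap l = [l.takeWhile pvTokChar] := by
  rw [splitCap_run, h]

lemma splitCap_of_dropWhile_cons (l d rs) (h : l.dropWhile pvTokChar = d :: rs) :
    pvSplitCap l = l.takeWhile pvTokChar :: [d] :: pvSplitCap rs := by
  rw [splitCap_run, h]

-- joining all pieces recovers the string
lemma flatten_splitCap (l : List Char) : (pvSplitCap l).flatten = l := by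
  induction l with
  | nil => rfl
  | cons c cs ih =>
      by_cases hc : pvTokChar c
      · rw [pvSplitCap, if_pos hc]
        cases h : pvSplitCap cs with
        | nil => exact absurd h (splitCap_ne_nil cs)
        | cons t ps =>
            rw [h] at ih
            simp only [List.flatten_cons] at ih ⊢
            simp [ih]
      · rw [pvSplitCap, if_neg hc]
        simp [ih]

lemma flatten_filter (ps : List (List Char)) :
    (ps.filter (fun p => !p.isEmpty)).flatten = ps.flatten := by
  induction ps with
  | nil => rfl
  | cons p ps ih =>
      by_cases hp : p = []
      · subst hp; simpa using ih
      · simp [hp, ih]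

lemma flatten_pieces (l : List Char) :
    ((pvSplitCap l).filter (fun p => !p.isEmpty)).flatten = l := by
  rw [flatten_filter, flatten_splitCap]

lemma pieces_nil : (pvSplitCap []).filter (fun p => !p.isEmpty) = [] := rfl

-- a delimiter character becomes its own singleton piece
lemma pieces_delim (cs : List Char) (i : Nat) (h : i < cs.length)
    (hd : pvDelim cs[i] = true) :
    (pvSplitCap (cs.drop i)).filter (fun p => !p.isEmpty) =
      [cs[i]] :: (pvSplitCap (cs.drop (i + 1))).filter (fun p => !p.isEmpty) := by
  have hc : pvTokChar cs[i] = false := by rw [pvTokChar_eq, hd]; rfl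
  have hdrop : cs.drop i = cs[i] :: cs.drop (i + 1) := List.drop_eq_getElem_cons h
  rw [hdrop, pvSplitCap, if_neg (by simp [hc])]
  simp

-- a token run becomes one piece spanning [i, pvScan i)
lemma pieces_token (cs : List Char) (i : Nat) (h : i < cs.length)
    (hd : pvDelim cs[i] = false) :
    (pvSplitCap (cs.drop i)).filter (fun p => !p.isEmpty) =
      ((cs.drop i).takeWhile pvTokChar) ::
        (pvSplitCap (cs.drop (pvScan cs i))).filter (fun p => !p.isEmpty) := by
  have hne : (cs.drop i).takeWhile pvTokChar ≠ [] := by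
    rw [List.drop_eq_getElem_cons h, List.takeWhile_cons]
    simp [pvTokChar_eq, hd]
  have hdw : cs.drop (pvScan cs i) = (cs.drop i).dropWhile pvTokChar := by
    rw [pvScan_spec cs i, ← drop_takeWhile pvTokChar (cs.drop i), List.drop_drop]
  rw [hdw]
  cases h2 : (cs.drop i).dropWhile pvTokChar with
  | nil =>
      rw [splitCap_of_dropWhile_nil _ h2]
      simp [hne, pieces_nil]
  | cons d rs =>
      have hdd : pvTokChar d = false := by
        have := List.head_dropWhile_not pvTokChar (l := cs.drop i) (by rw [h2]; simp)
        rw [show ((cs.drop i).dropWhile pvTokChar).head (by rw [h2]; simp) = d from by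
          simp [h2]] at this
        simpa using this
      rw [splitCap_of_dropWhile_cons _ _ _ h2]
      rw [pvSplitCap, if_neg (by simp [hdd])]
      simp [hne]

-- token pieces are never delimiter pieces
lemma tok_not_delim (l t : List Char) (ht : t = l.takeWhile pvTokChar) (_hne : t ≠ []) :
    ¬ (t = ['['] ∨ t = [']'] ∨ t = [',']) := by
  intro hcase
  have hmem : ∀ c, c ∈ l.takeWhile pvTokChar → pvTokChar c := fun c hc =>
    List.mem_takeWhile_imp hc
  rcases hcase with h1 | h1 | h1 <;>
  · have := hmem _ (by rw [← ht, h1]; exact List.mem_singleton_self _)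
    revert this
    decide

-- A's while loop = B's piece loop, for any accumulator whose join is the prefix
lemma loop_b (cs : List Char) (i : Nat) :
    ∀ out : List (List Char), out.flatten = cs.take i →
    pvLoop cs i = (match pvBLoop ((pvSplitCap (cs.drop i)).filter (fun p => !p.isEmpty)) out with
      | some r => r
      | none => cs) := by
  fun_induction pvLoop cs i with
  | case1 i h hd e num hnum nMin nMax hlt =>
      intro out hout
      have hd' : pvDelim cs[i] = false := by simpa using hd
      rw [pieces_token cs i h hd']
      have htok := tok_slice cs i
      rw [pvBLoop]
      rw [if_neg (tok_not_delim (cs.drop i) _ rfl (by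
        rw [List.drop_eq_getElem_cons h, List.takeWhile_cons]
        simp [pvTokChar_eq, hd']))]
      simp only [htok]
      rw [if_pos hnum]
      simp only [List.flatten_append, List.flatten_cons, List.flatten_nil, List.append_nil,
        hout, flatten_pieces]
      rw [PySem.List.slice_to_natCast, PySem.List.slice_from_natCast]
  | case2 i h hd e num hnum nMin nMax hge =>
      intro out hout
      have hd' : pvDelim cs[i] = false := by simpa using hd
      have he : pvScan cs i = cs.length := by
        have h1 := pvScan_le cs i (Nat.le_of_lt h)
        have h2 : ¬ pvScan cs i < cs.length := hge
        omega
      rw [pieces_token cs i h hd']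
      have htok := tok_slice cs i
      rw [pvBLoop]
      rw [if_neg (tok_not_delim (cs.drop i) _ rfl (by
        rw [List.drop_eq_getElem_cons h, List.takeWhile_cons]
        simp [pvTokChar_eq, hd']))]
      simp only [htok]
      rw [if_pos hnum]
      have hdropnil : cs.drop (pvScan cs i) = [] := by rw [he]; exact List.drop_length
      rw [hdropnil, pieces_nil]
      simp only [List.flatten_append, List.flatten_cons, List.flatten_nil, List.append_nil,
        hout]
      rw [PySem.List.slice_to_natCast]
  | case3 i h hd e num hnum ih =>
      intro out hout
      have hd' : pvDelim cs[i] = false := by simpa using hd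
      rw [pieces_token cs i h hd']
      have htok := tok_slice cs i
      rw [pvBLoop]
      rw [if_neg (tok_not_delim (cs.drop i) _ rfl (by
        rw [List.drop_eq_getElem_cons h, List.takeWhile_cons]
        simp [pvTokChar_eq, hd']))]
      rw [if_neg (by rw [htok]; exact hnum)]
      have hie : i ≤ pvScan cs i := pvScan_ge cs i
      have hout1 : (out ++ [(cs.drop i).takeWhile pvTokChar]).flatten = cs.take (pvScan cs i) := by
        rw [List.flatten_append, hout, tok_slice cs i, PySem.List.slice_natCast]
        simp only [List.flatten_cons, List.flatten_nil, List.append_nil]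
        conv_rhs => rw [show pvScan cs i = i + (pvScan cs i - i) from by omega, List.take_add]
      by_cases he : pvScan cs i < cs.length
      · rw [pieces_delim cs (pvScan cs i) he (pvScan_stop cs i he)]
        rw [pvBLoop]
        rw [if_pos (by
          have := pvScan_stop cs i he
          rcases (pvDelim_iff _).1 this with h1 | h1 | h1 <;> simp [h1]
          )]
        apply ih
        simp only [List.flatten_append, List.flatten_cons, List.flatten_nil, List.append_nil,
          hout1]
        show List.take (pvScan cs i) cs ++ [cs[pvScan cs i]] = List.take (pvScan cs i + 1) cs
        rw [List.take_add_one, List.getElem?_eq_getElem he]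
        simp
      · have he2 : pvScan cs i = cs.length := by
          have := pvScan_le cs i (Nat.le_of_lt h); omega
        have hnil : cs.drop (pvScan cs i) = [] := by rw [he2]; exact List.drop_length
        have hnil1 : cs.drop (pvScan cs i + 1) = [] :=
          List.drop_eq_nil_of_le (by omega)
        rw [hnil, pieces_nil]
        rw [ih (out ++ [(cs.drop i).takeWhile pvTokChar]) (by
          rw [hout1, he2, List.take_length, List.take_of_length_le (by omega)])]
        rw [hnil1, pieces_nil]
  | case4 i h hd ih =>
      intro out hout
      have hd' : pvDelim cs[i] = true := by simpa using hd
      rw [pieces_delim cs i h hd']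
      rw [pvBLoop]
      rw [if_pos (by rcases (pvDelim_iff _).1 hd' with h1 | h1 | h1 <;> simp [h1])]
      apply ih
      rw [List.flatten_append, hout, List.take_add_one]
      simp [List.getElem?_eq_getElem h]
  | case5 i h =>
      intro out hout
      rw [List.drop_eq_nil_of_le (Nat.le_of_not_lt h), pieces_nil]
      rfl

lemma main_eq (s : String) : split s = split_alt s := by
  unfold split split_alt
  rw [loop_b s.toList 0 [] (by simp)]
  simp only [List.drop_zero]
  cases h : pvBLoop ((pvSplitCap s.toList).filter (fun p => !p.isEmpty)) [] with
  | none => simp [String.ofList_toList]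
  | some r => rfl

-- ===== VERDICT (by name: the statement is the Claim_ definition above) =====
theorem split_spec : Claim_equal_split := by
  intro s _ _
  unfold Spec_split
  exact main_eq s
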